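-- pv_equiv track=rewrite | github.com/ansible/ansible-lint | src/ansiblelint/rules/jinja.py | unlex
-- ===== SOURCE A (Python) =====
-- from typing import TYPE_CHECKING, Any, NamedTuple
--
-- class Token(NamedTuple):
--     """Token."""
--
--     lineno: int
--     token_type: str
--     value: str
--
-- def unlex(tokens: list[Token]) -> str:
--     """Return original text by compiling the lex output."""
--     result = ""
--     last_lineno = 1
--     last_value = ""
--     for lineno, _, value in tokens:
--         if lineno > last_lineno and "\n" not in last_value:
--             result += "\n"
--         result += value
--         last_lineno = lineno
--         last_value = value
--     return result
-- ===== SOURCE B (Python) =====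
-- def unlex(tokens):
--     """Return original text by compiling the lex output."""
--     # Stage 1: group consecutive tokens that share a line number into runs.
--     runs = []  # list of (lineno, [values...])
--     for lineno, _, value in tokens:
--         if runs and runs[-1][0] == lineno:
--             runs[-1][1].append(value)
--         else:
--             runs.append((lineno, [value]))
--     # Stage 2: emit the runs, inserting "\n" between runs when the line number
--     # increases and the previous run's last value has no newline already; the
--     # run before the first one is the virtual (1, [""]).
--     parts = []
--     for i, (lineno, values) in enumerate(runs):
--         prev_lineno, prev_last = (runs[i - 1][0], runs[i - 1][1][-1]) if i else (1, "")
--         if lineno > prev_lineno and "\n" not in prev_last: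
--             parts.append("\n")
--         parts.extend(values)
--     return "".join(parts)
-- ===== Notes on version B (the rewrite author's own statement) =====
-- stated objective: alternative
-- what changed: B first groups consecutive tokens sharing a line number into runs (a different intermediate data structure), then emits the runs, deciding the inserted newline only at run boundaries by indexing the previous run, and joins once; A is a single per-token state machine with string concatenation.
import Mathlib
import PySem

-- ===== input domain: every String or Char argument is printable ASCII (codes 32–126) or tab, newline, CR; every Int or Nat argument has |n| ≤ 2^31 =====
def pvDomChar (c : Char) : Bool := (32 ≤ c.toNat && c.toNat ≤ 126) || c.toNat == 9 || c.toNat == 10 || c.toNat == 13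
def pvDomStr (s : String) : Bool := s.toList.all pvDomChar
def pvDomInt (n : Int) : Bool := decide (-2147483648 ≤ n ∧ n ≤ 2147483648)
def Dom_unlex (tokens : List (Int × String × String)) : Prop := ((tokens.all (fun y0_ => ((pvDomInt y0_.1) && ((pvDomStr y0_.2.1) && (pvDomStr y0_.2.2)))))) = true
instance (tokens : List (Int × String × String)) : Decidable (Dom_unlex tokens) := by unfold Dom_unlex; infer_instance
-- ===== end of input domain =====

-- B groups consecutive same-line tokens into runs and then emits the runs (separator decided
-- only at run boundaries, previous run found by index), joining once — instead of A's per-token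
-- state machine with repeated string concatenation (objective: alternative).

-- ===== PORT A =====
-- state = (result as List Char, last_lineno, last_value); 'result += s' is list append,
-- the final String.ofList packages the accumulated Python string (exact for Python str).
def unlexStep (s : List Char × Int × String) (t : Int × String × String) : List Char × Int × String :=
  let res := if decide (t.1 > s.2.1) && !PySem.Str.isIn "\n" s.2.2 then s.1 ++ "\n".toList else s.1
  (res ++ t.2.2.toList, t.1, t.2.2)

def unlex (tokens : List (Int × String × String)) : String :=
  String.ofList (tokens.foldl unlexStep ([], 1, "")).1

-- ===== PORT B =====
-- Stage 1: 'if runs and runs[-1][0] == lineno' — modify the last run or append a new one.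
def runsStep (runs : List (Int × List String)) (tok : Int × String × String) : List (Int × List String) :=
  match runs.getLast? with
  | some r =>
      if r.1 == tok.1 then runs.dropLast ++ [(r.1, r.2 ++ [tok.2.2])]
      else runs ++ [(tok.1, [tok.2.2])]
  | none => runs ++ [(tok.1, [tok.2.2])]

-- Stage 2 body: for i, (lineno, values) in enumerate(runs); runs[i-1] / values[-1] via pyGet?
-- (the .getD defaults are unreachable: i-1 is in range for i ≥ 1 and runs hold ≥ 1 value).
def emitStep (runs : List (Int × List String)) (parts : List String) (ir : Int × Int × List String) : List String :=
  let pl : Int × String :=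
    if ir.1 == 0 then (1, "")
    else
      let pr := (PySem.List.pyGet? runs (ir.1 - 1)).getD (1, [])
      (pr.1, (PySem.List.pyGet? pr.2 (-1)).getD "")
  let parts1 := if decide (ir.2.1 > pl.1) && !PySem.Str.isIn "\n" pl.2 then parts ++ ["\n"] else parts
  parts1 ++ ir.2.2

def unlex_alt (tokens : List (Int × String × String)) : String :=
  let runs := tokens.foldl runsStep []
  PySem.Str.join "" ((PySem.List.enumerate runs).foldl (emitStep runs) [])

-- ===== PRECONDITION & SPEC =====
def Spec_unlex (tokens : List (Int × String × String)) (out : String) : Prop := out = unlex_alt tokens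
instance (tokens : List (Int × String × String)) (out : String) : Decidable (Spec_unlex tokens out) := by unfold Spec_unlex; infer_instance

-- ===== CLAIM (what is proved, stated in full; the proofs are below) =====
def Claim_equal_unlex : Prop := ∀ (tokens : List (Int × String × String)), Dom_unlex tokens → Spec_unlex tokens (unlex tokens)

-- ===== LEMMAS AND PROOFS =====

-- the text A emits after state (prevL, prevV), over (lineno, value) pairs
def pvEmit (prevL : Int) (prevV : String) : List (Int × String) → List Char
  | [] => []
  | c :: rest =>
      (if decide (c.1 > prevL) && !PySem.Str.isIn "\n" prevV then "\n".toList else []) ++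
        c.2.toList ++ pvEmit c.1 c.2 rest

-- the pieces B's stage 2 emits after a previous run with line prevL and last value prevV
def pvEmitR (prevL : Int) (prevV : String) : List (Int × List String) → List String
  | [] => []
  | r :: rest =>
      (if decide (r.1 > prevL) && !PySem.Str.isIn "\n" prevV then ["\n"] else []) ++
        r.2 ++ pvEmitR r.1 ((PySem.List.pyGet? r.2 (-1)).getD "") rest

-- the token list a run list stands for
def pvExpand (runs : List (Int × List String)) : List (Int × String) :=
  runs.flatMap (fun r => r.2.map (fun v => (r.1, v)))

lemma pvFoldA (ts : List (Int × String × String)) (res : List Char) (prevL : Int) (prevV : String) :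
    (ts.foldl unlexStep (res, prevL, prevV)).1
      = res ++ pvEmit prevL prevV (ts.map (fun t => (t.1, t.2.2))) := by
  induction ts generalizing res prevL prevV with
  | nil => simp [pvEmit]
  | cons c rest ih =>
      simp only [List.foldl_cons, List.map_cons, pvEmit]
      have := ih (res := (unlexStep (res, prevL, prevV) c).1) (prevL := c.1) (prevV := c.2.2)
      simp only [unlexStep] at this ⊢
      split_ifs at this ⊢ <;> simp_all

lemma pvRunsStep_expand (acc : List (Int × List String)) (t : Int × String × String)
    (hgood : ∀ r ∈ acc, r.2 ≠ []) :
    pvExpand (runsStep acc t) = pvExpand acc ++ [(t.1, t.2.2)]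
      ∧ ∀ r ∈ runsStep acc t, r.2 ≠ [] := by
  unfold runsStep
  cases h : acc.getLast? with
  | none =>
      constructor
      · simp [pvExpand]
      · intro r hr
        rcases List.mem_append.1 hr with h1 | h1
        · exact hgood r h1
        · simp at h1; subst h1; simp
  | some r =>
      rcases List.getLast?_eq_some_iff.1 h with ⟨l', rfl⟩
      by_cases he : r.1 == t.1
      · simp only [he, if_true]
        have he' : r.1 = t.1 := beq_iff_eq.mp he
        constructor
        · simp [pvExpand, he']
        · intro q hq
          simp only [List.dropLast_concat] at hq
          rcases List.mem_append.1 hq with h1 | h1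
          · exact hgood q (List.mem_append.2 (Or.inl h1))
          · simp at h1; subst h1; simp
      · simp only [he]
        constructor
        · simp [pvExpand]
        · intro q hq
          rcases List.mem_append.1 hq with h1 | h1
          · exact hgood q h1
          · simp at h1; subst h1; simp

lemma pvRuns_expand (ts : List (Int × String × String)) (acc : List (Int × List String))
    (hgood : ∀ r ∈ acc, r.2 ≠ []) :
    pvExpand (ts.foldl runsStep acc) = pvExpand acc ++ ts.map (fun t => (t.1, t.2.2))
      ∧ ∀ r ∈ ts.foldl runsStep acc, r.2 ≠ [] := by
  induction ts generalizing acc with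
  | nil => simpa using hgood
  | cons t rest ih =>
      obtain ⟨h1, h2⟩ := pvRunsStep_expand acc t hgood
      obtain ⟨h3, h4⟩ := ih (runsStep acc t) h2
      refine ⟨?_, h4⟩
      simp [List.foldl_cons, h3, h1]

-- B's stage-2 fold, started at offset k with the previous-run info (pL, pV), is pvEmitR
lemma pvStage2 (runs : List (Int × List String)) :
    ∀ (rest : List (Int × List String)) (k : Nat) (parts : List String) (pL : Int) (pV : String),
    runs.drop k = rest →
    (k = 0 → pL = 1 ∧ pV = "") →
    (k ≠ 0 → ∃ r, runs[k-1]? = some r ∧ pL = r.1 ∧ pV = (PySem.List.pyGet? r.2 (-1)).getD "") →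
    (PySem.List.enumerate rest (k : Int)).foldl (emitStep runs) parts
      = parts ++ pvEmitR pL pV rest := by
  intro rest
  induction rest with
  | nil => intro k parts pL pV _ _ _; simp [PySem.List.enumerate_nil, pvEmitR]
  | cons r rest' ih =>
      intro k parts pL pV hdrop h0 hk
      rw [PySem.List.enumerate_cons, List.foldl_cons]
      have hget : runs[k]? = some r := by
        have : (runs.drop k)[0]? = some r := by rw [hdrop]; rfl
        simpa using this
      have hdrop' : runs.drop (k+1) = rest' := by
        have := congrArg List.tail hdrop
        simpa [List.tail_drop] using this
      have hstep : emitStep runs parts ((k : Int), r)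
          = (if decide (r.1 > pL) && !PySem.Str.isIn "\n" pV then parts ++ ["\n"] else parts) ++ r.2 := by
        unfold emitStep
        rcases Nat.eq_zero_or_pos k with hk0 | hkpos
        · obtain ⟨hL, hV⟩ := h0 hk0
          subst hk0 hL hV; simp
        · obtain ⟨q, hq, hL, hV⟩ := hk (Nat.pos_iff_ne_zero.1 hkpos)
          have hknz : ((k : Int) == 0) = false := by
            simp; omega
          have hcast : (k : Int) - 1 = ((k - 1 : Nat) : Int) := by omega
          rw [hknz]
          simp only [Bool.false_eq_true, if_false, hcast, PySem.List.pyGet?_natCast, hq]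
          subst hL hV; rfl
      rw [hstep]
      have := ih (k+1) ((if decide (r.1 > pL) && !PySem.Str.isIn "\n" pV then parts ++ ["\n"] else parts) ++ r.2)
        r.1 ((PySem.List.pyGet? r.2 (-1)).getD "") hdrop' (by omega)
        (by intro _; exact ⟨r, by simpa using hget, rfl, rfl⟩)
      rw [show ((k : Int) + 1) = ((k + 1 : Nat) : Int) by omega, this]
      simp only [pvEmitR]
      split_ifs with h <;> simp

lemma pvLastNeg (v : String) (vs : List String) :
    (PySem.List.pyGet? (v :: vs) (-1)).getD "" = vs.getLast?.getD v := by
  simp [PySem.List.pyGet?, PySem.List.pyIdx?]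
  have h1 : (v :: vs).getLast? = some ((v :: vs)[vs.length]) := by
    rw [List.getLast?_eq_getElem?]; simp
  rw [List.getLast?_cons] at h1
  exact (Option.some.inj h1).symm

-- within one run every lineno equals the run's, so A inserts no separator
lemma pvEmit_run (vs : List String) (l : Int) (pV : String) (E : List (Int × String)) :
    pvEmit l pV (vs.map (fun v => (l, v)) ++ E)
      = (vs.map String.toList).flatten ++ pvEmit l (vs.getLast?.getD pV) E := by
  induction vs generalizing pV with
  | nil => simp
  | cons v vs' ih =>
      simp only [List.map_cons, List.cons_append, pvEmit]
      rw [ih v]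
      simp [List.getLast?_cons]

lemma pvJoinNil (l : List (List Char)) : PySem.Chars.join [] l = l.flatten := by
  induction l with
  | nil => simp [PySem.Chars.join, List.intercalate]
  | cons x xs ih =>
      cases xs with
      | nil => simp [PySem.Chars.join_singleton]
      | cons y ys => simpa [PySem.Chars.join_cons_cons] using ih

lemma pvEmitR_expand : ∀ (runs : List (Int × List String)) (pL : Int) (pV : String),
    (∀ r ∈ runs, r.2 ≠ []) →
    ((pvEmitR pL pV runs).map String.toList).flatten = pvEmit pL pV (pvExpand runs) := by
  intro runs
  induction runs with
  | nil => intro pL pV _; simp [pvEmitR, pvExpand, pvEmit]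
  | cons r rest ih =>
      intro pL pV hgood
      obtain ⟨v, vs, hr⟩ := List.exists_cons_of_ne_nil (hgood r (by simp))
      have hrest : ∀ q ∈ rest, q.2 ≠ [] := fun q hq => hgood q (by simp [hq])
      simp only [pvEmitR, pvExpand, List.flatMap_cons]
      rw [hr]
      simp only [List.map_cons, List.cons_append, pvEmit, pvLastNeg]
      rw [pvEmit_run vs r.1 v (rest.flatMap (fun q => q.2.map (fun v => (q.1, v))))]
      have ihh := ih r.1 (vs.getLast?.getD v) hrest
      unfold pvExpand at ihh
      rw [← ihh]
      split_ifs <;> simp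

-- ===== VERDICT (by name: the statement is the Claim_ definition above) =====
theorem unlex_spec : Claim_equal_unlex := by
  intro tokens _
  show unlex tokens = unlex_alt tokens
  obtain ⟨hexp, hgood⟩ := pvRuns_expand tokens [] (by simp)
  have h2 := pvStage2 (tokens.foldl runsStep []) (tokens.foldl runsStep []) 0 [] 1 ""
    (by simp) (fun _ => ⟨rfl, rfl⟩) (by simp)
  simp only [Nat.cast_zero, List.nil_append] at h2
  have hB : (unlex_alt tokens).toList = pvEmit 1 "" (tokens.map (fun t => (t.1, t.2.2))) := by
    show (PySem.Str.join "" ((PySem.List.enumerate (tokens.foldl runsStep [])).foldl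
        (emitStep (tokens.foldl runsStep [])) [])).toList = _
    rw [h2, PySem.Str.toList_join]
    rw [show ("" : String).toList = ([] : List Char) from rfl, pvJoinNil, pvEmitR_expand _ 1 "" hgood, hexp]
    simp [pvExpand]
  have hA : (unlex tokens).toList = pvEmit 1 "" (tokens.map (fun t => (t.1, t.2.2))) := by
    unfold unlex
    rw [pvFoldA tokens [] 1 ""]
    simp [String.toList_ofList]
  exact String.toList_inj.mp (hA.trans hB.symm)
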